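-- pv_equiv track=rewrite | github.com/lawtech0902/py_imooc_algorithm | 手撕算法/小红书笔试_2.py | dp_zeroes
-- ===== SOURCE A (Python) =====
-- def trailing_zeroes(n):
--     return 0 if n == 0 else (n // 5 + trailing_zeroes(n // 5))
--
-- def dp_zeroes(n):
--     dp = [0] * (n + 1)
--     if n <= 4:
--         return 0
--     elif n == 5:
--         return 1
--     else:
--         dp[5] = trailing_zeroes(5)
--         for i in range(6, n + 1):
--             dp[i] = trailing_zeroes(i) + dp[i - 1]
--         return dp[n]
-- ===== SOURCE B (Python) =====
-- def dp_zeroes(n):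
--     # Closed form: sum_{i<=n} (zeros of i!) = sum over powers p=5^k<=n of sum_{i<=n} i//p,
--     # and each inner sum is computed by the grouping (Gauss) formula -> O(log n) total.
--     total = 0
--     p = 5
--     while p <= n:
--         q, r = divmod(n, p)
--         total += p * q * (q - 1) // 2 + q * (r + 1)
--         p *= 5
--     return total
-- ===== Notes on version B (the rewrite author's own statement) =====
-- stated objective: faster
-- what changed: Replaces the O(n)-size dp table summing trailing_zeroes(i) for each i=5..n (each itself a loop over powers of 5) by a swap of the summation order: for each power p=5^k<=n the sum of i//p over i<=n is computed by a closed-form grouping (Gauss) formula, giving an O(log n) loop with no table.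
import Mathlib
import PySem

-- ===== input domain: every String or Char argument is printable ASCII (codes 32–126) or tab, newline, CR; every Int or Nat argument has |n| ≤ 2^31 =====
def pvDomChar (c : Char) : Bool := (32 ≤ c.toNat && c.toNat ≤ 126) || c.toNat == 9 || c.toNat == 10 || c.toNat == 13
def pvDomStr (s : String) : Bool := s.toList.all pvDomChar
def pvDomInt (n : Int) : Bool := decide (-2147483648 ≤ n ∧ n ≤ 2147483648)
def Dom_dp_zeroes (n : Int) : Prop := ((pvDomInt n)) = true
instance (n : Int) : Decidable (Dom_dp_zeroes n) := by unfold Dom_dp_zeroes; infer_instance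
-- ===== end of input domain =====

-- B replaces A's O(n)-size dp table (summing trailing_zeroes(i) per i) by a loop over the
-- powers of 5 up to n with a closed-form (Gauss) block sum per power; objective: faster.

-- ===== PORT A =====
-- trailing_zeroes: Python recurses on n // 5; the `n < 0` branch is a totality guard only
-- (Python recurses forever there; dp_zeroes only calls it with n ≥ 5).
def trailingZeroes (n : Int) : Int :=
  if n = 0 then 0
  else if n < 0 then 0
  else PySem.Int.floordiv n 5 + trailingZeroes (PySem.Int.floordiv n 5)
termination_by n.toNat
decreasing_by
  have h5 : PySem.Int.floordiv n 5 = n / 5 := PySem.Int.floordiv_eq_ediv_of_pos (by omega)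
  rw [h5]; omega

-- dp[i] = v on an in-range index is List.set (every write/read of dp here is in range).
def dp_zeroes (n : Int) : Int :=
  let dp := List.replicate (n + 1).toNat (0 : Int)
  if n ≤ 4 then 0
  else if n = 5 then 1
  else
    let dp := dp.set 5 (trailingZeroes 5)
    let dp := (PySem.List.pyRange 6 (n + 1) 1).foldl
      (fun dp i => dp.set i.toNat (trailingZeroes i + PySem.List.pyGetD dp (i - 1) 0)) dp
    PySem.List.pyGetD dp n 0

-- ===== PORT B =====
-- the while-loop of Source B; hp is a totality witness only (p is always a positive power of 5)
def altLoop (n p total : Int) (hp : 0 < p) : Int :=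
  if p ≤ n then
    let q := PySem.Int.floordiv n p
    let r := PySem.Int.mod n p
    altLoop n (p * 5) (total + (PySem.Int.floordiv (p * q * (q - 1)) 2 + q * (r + 1))) (by positivity)
  else total
termination_by (n + 1 - p).toNat
decreasing_by omega

def dp_zeroes_alt (n : Int) : Int := altLoop n 5 0 (by norm_num)

-- ===== PRECONDITION & SPEC =====
def Spec_dp_zeroes (n : Int) (out : Int) : Prop := out = dp_zeroes_alt n
instance (n : Int) (out : Int) : Decidable (Spec_dp_zeroes n out) := by unfold Spec_dp_zeroes; infer_instance

-- ===== CLAIM (what is proved, stated in full; the proofs are below) =====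
def Claim_equal_dp_zeroes : Prop := ∀ (n : Int), Dom_dp_zeroes n → Spec_dp_zeroes n (dp_zeroes n)

-- ===== LEMMAS AND PROOFS =====

-- trailing_zeroes on ℕ
def tzN (n : Nat) : Nat :=
  if n = 0 then 0 else n / 5 + tzN (n / 5)
termination_by n
decreasing_by exact Nat.div_lt_self (by omega) (by omega)

-- ∑_{i ≤ n} tzN i : the common value of both programs for n ≥ 0
def SN (n : Nat) : Nat := ∑ i ∈ Finset.range (n + 1), tzN i

-- closed block-sum for one power of 5 (ℕ form of one loop body of B)
def gN (n p : Nat) : Nat := p * (∑ j ∈ Finset.range (n / p), j) + (n / p) * (n % p + 1)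

-- one loop body of B over ℤ
def gInt (n p : Int) : Int :=
  PySem.Int.floordiv (p * (PySem.Int.floordiv n p) * (PySem.Int.floordiv n p - 1)) 2
    + (PySem.Int.floordiv n p) * (PySem.Int.mod n p + 1)

theorem tz_cast (m : Nat) : trailingZeroes (m : Int) = (tzN m : Int) := by
  induction m using Nat.strong_induction_on with
  | _ m ih =>
    rw [trailingZeroes, tzN]
    rcases Nat.eq_zero_or_pos m with h | h
    · simp [h]
    · have hm0 : (m : Int) ≠ 0 := by omega
      have hmn : ¬ (m : Int) < 0 := by omega
      have hfd : PySem.Int.floordiv (m : Int) 5 = ((m / 5 : Nat) : Int) := by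
        exact_mod_cast PySem.Int.floordiv_natCast m 5
      rw [if_neg hm0, if_neg hmn, hfd, ih (m / 5) (Nat.div_lt_self h (by omega))]
      have : m ≠ 0 := by omega
      rw [if_neg this]
      push_cast
      ring

-- finite Legendre expansion of tzN
theorem legendre (K : Nat) : ∀ m : Nat, m < 5 ^ (K + 1) →
    tzN m = ∑ k ∈ Finset.range K, m / 5 ^ (k + 1) := by
  induction K with
  | zero =>
    intro m hm
    rw [tzN]
    rcases Nat.eq_zero_or_pos m with h | h
    · simp [h]
    · have h5 : m / 5 = 0 := Nat.div_eq_of_lt (by simpa using hm)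
      simp [h5, tzN]
  | succ K ih =>
    intro m hm
    rw [tzN]
    rcases Nat.eq_zero_or_pos m with h | h
    · simp [h]
    · have hdiv : m / 5 < 5 ^ (K + 1) := by
        have : m < 5 ^ (K + 1) * 5 := by rw [← pow_succ]; exact hm
        omega
      rw [if_neg (by omega), ih (m / 5) hdiv, Finset.sum_range_succ']
      simp only [pow_succ, pow_zero, one_mul]
      have hc : ∀ k ∈ Finset.range K, m / 5 / (5 ^ k * 5) = m / (5 ^ k * 5 * 5) := by
        intro k _; rw [Nat.div_div_eq_div_mul]; ring_nf
      rw [Finset.sum_congr rfl hc]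
      omega

-- block-sum (Gauss) closed form for ∑_{i ≤ n} i / p
theorem gauss (p : Nat) (hp : 0 < p) (n : Nat) :
    ∑ i ∈ Finset.range (n + 1), i / p = gN n p := by
  induction n with
  | zero => simp [gN, Nat.div_eq_of_lt hp]
  | succ n ih =>
    rw [Finset.sum_range_succ, ih]
    unfold gN
    have hd := Nat.div_add_mod n p
    set q := n / p with hq
    set r := n % p with hr
    have hrp : r < p := Nat.mod_lt _ hp
    rcases Nat.lt_or_ge (r + 1) p with hlt | hge
    · have h1 : (n + 1) / p = q := by
        rw [(by omega : n + 1 = r + 1 + p * q), Nat.add_mul_div_left _ _ hp,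
          Nat.div_eq_of_lt hlt]; omega
      have h2 : (n + 1) % p = r + 1 := by
        rw [(by omega : n + 1 = r + 1 + p * q), Nat.add_mul_mod_self_left]
        exact Nat.mod_eq_of_lt hlt
      rw [h1, h2]; ring
    · have hrp1 : r + 1 = p := by omega
      have hn : n + 1 = p * (q + 1) := by rw [mul_add, mul_one]; omega
      have h1 : (n + 1) / p = q + 1 := by
        rw [hn, Nat.mul_div_cancel_left _ hp]
      have h2 : (n + 1) % p = 0 := by
        rw [hn]; simp [Nat.mul_mod_right]
      rw [h1, h2, Finset.sum_range_succ, hrp1]; ring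

-- swap the summation order: ∑_i tzN i = ∑_k (block sum of power 5^(k+1))
theorem SN_eq (N : Nat) : SN N = ∑ k ∈ Finset.range N, gN N (5 ^ (k + 1)) := by
  have hN : ∀ i ∈ Finset.range (N + 1), tzN i = ∑ k ∈ Finset.range N, i / 5 ^ (k + 1) := by
    intro i hi
    apply legendre
    have h1 : i ≤ N := by simpa [Nat.lt_succ_iff] using hi
    calc i ≤ N := h1
      _ < 5 ^ N := Nat.lt_pow_self (by omega)
      _ ≤ 5 ^ (N + 1) := Nat.pow_le_pow_right (by omega) (by omega)
  unfold SN
  rw [Finset.sum_congr rfl hN, Finset.sum_comm]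
  exact Finset.sum_congr rfl fun k _ => gauss _ (by positivity) N

theorem gInt_zero (n p : Int) (h0 : 0 ≤ n) (h : n < p) : gInt n p = 0 := by
  have hp : 0 < p := by omega
  have hq : PySem.Int.floordiv n p = 0 := by
    rw [PySem.Int.floordiv_eq_ediv_of_pos hp]
    exact Int.ediv_eq_zero_of_lt h0 h
  simp [gInt, hq]

theorem gInt_cast (n p : Nat) : gInt (n : Int) (p : Int) = (gN n p : Int) := by
  have hq : PySem.Int.floordiv (n : Int) (p : Int) = ((n / p : Nat) : Int) :=
    PySem.Int.floordiv_natCast n p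
  have hr : PySem.Int.mod (n : Int) (p : Int) = ((n % p : Nat) : Int) :=
    PySem.Int.mod_natCast n p
  unfold gInt gN
  rw [hq, hr]
  set q := n / p with hqd
  have htri : (∑ j ∈ Finset.range q, j) * 2 = q * (q - 1) := Finset.sum_range_id_mul_two q
  have hfd : PySem.Int.floordiv ((p : Int) * (q : Int) * ((q : Int) - 1)) 2
      = (p : Int) * ((∑ j ∈ Finset.range q, j : Nat) : Int) := by
    rcases Nat.eq_zero_or_pos q with h0 | h0
    · simp [h0]
    · have hq1 : ((q : Int) - 1) = ((q - 1 : Nat) : Int) := by omega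
      rw [hq1]
      have : (p : Int) * (q : Int) * ((q - 1 : Nat) : Int) = ((p * (q * (q - 1)) : Nat) : Int) := by
        push_cast; ring
      rw [this]
      have h2 : p * (q * (q - 1)) = (p * ∑ j ∈ Finset.range q, j) * 2 := by
        rw [← htri]; ring
      rw [h2]
      have hcast : PySem.Int.floordiv ((((p * ∑ j ∈ Finset.range q, j) * 2 : Nat)) : Int) 2
          = ((((p * ∑ j ∈ Finset.range q, j) * 2) / 2 : Nat) : Int) := by
        exact_mod_cast PySem.Int.floordiv_natCast ((p * ∑ j ∈ Finset.range q, j) * 2) 2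
      have h3 : (p * ∑ j ∈ Finset.range q, j) * 2 / 2 = p * ∑ j ∈ Finset.range q, j := by
        omega
      rw [hcast, h3]
      push_cast; ring
  rw [hfd]; push_cast; ring

-- B's loop sums gInt over the powers p, 5p, 25p, …
theorem altLoop_eq (m : Nat) : ∀ (n p total : Int) (hp : 0 < p), 0 ≤ n → n < p * 5 ^ m →
    altLoop n p total hp = total + ∑ k ∈ Finset.range m, gInt n (p * 5 ^ k) := by
  induction m with
  | zero =>
    intro n p total hp h0 hm
    rw [altLoop]
    simp at hm ⊢
    omega
  | succ m ih =>
    intro n p total hp h0 hm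
    by_cases hpn : p ≤ n
    · rw [altLoop, if_pos hpn]
      rw [ih n (p * 5) _ (by positivity) h0
        (by calc n < p * 5 ^ (m + 1) := hm
          _ = p * 5 * 5 ^ m := by ring)]
      rw [Finset.sum_range_succ']
      have hterm : ∀ k ∈ Finset.range m, gInt n (p * 5 * 5 ^ k) = gInt n (p * 5 ^ (k + 1)) := by
        intro k _; ring_nf
      rw [Finset.sum_congr rfl hterm]
      simp [gInt]
      ring
    · rw [altLoop, if_neg hpn]
      have : ∀ k ∈ Finset.range (m + 1), gInt n (p * 5 ^ k) = 0 := by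
        intro k _
        apply gInt_zero n _ h0
        have h1 : p ≤ p * 5 ^ k := le_mul_of_one_le_right (by omega) (one_le_pow₀ (by omega))
        omega
      rw [Finset.sum_congr rfl this]
      simp

theorem alt_eq_SN (n : Int) (h0 : 0 ≤ n) : dp_zeroes_alt n = (SN n.toNat : Int) := by
  set N := n.toNat with hN
  have hn : n = (N : Int) := by omega
  have hlt : n < 5 * 5 ^ N := by
    have h1 : N < 5 ^ N := Nat.lt_pow_self (by omega)
    have h2 : ((N : Int)) < ((5 ^ N : Nat) : Int) := by exact_mod_cast h1
    have h3 : (0 : Int) ≤ 5 ^ N := by positivity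
    push_cast at h2
    omega
  rw [dp_zeroes_alt, altLoop_eq N n 5 0 (by norm_num) h0 hlt, SN_eq N, zero_add]
  rw [Nat.cast_sum]
  apply Finset.sum_congr rfl
  intro k _
  have hp : ((5 ^ (k + 1) : Nat) : Int) = 5 * 5 ^ k := by push_cast; ring
  rw [hn, ← hp, gInt_cast N (5 ^ (k + 1))]

-- invariant of A's dp loop: after processing i = 6..m, dp[m] = ∑_{i ≤ m} tzN i
theorem fold_inv (n : Int) (h6 : 6 ≤ n) :
    ∀ m : Nat, 5 ≤ m → (m : Int) ≤ n →
    (((PySem.List.pyRange 6 ((m : Int) + 1) 1).foldl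
        (fun dp i => dp.set i.toNat (trailingZeroes i + PySem.List.pyGetD dp (i - 1) 0))
        ((List.replicate (n + 1).toNat (0 : Int)).set 5 (trailingZeroes 5))).length
      = (n + 1).toNat
    ∧ PySem.List.pyGetD
        ((PySem.List.pyRange 6 ((m : Int) + 1) 1).foldl
          (fun dp i => dp.set i.toNat (trailingZeroes i + PySem.List.pyGetD dp (i - 1) 0))
          ((List.replicate (n + 1).toNat (0 : Int)).set 5 (trailingZeroes 5)))
        (m : Int) 0 = (SN m : Int)) := by
  intro m hm5
  induction m, hm5 using Nat.le_induction with
  | base =>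
    intro hle
    have hr : PySem.List.pyRange 6 ((5 : Nat) + 1 : Int) 1 = [] := by
      apply PySem.List.pyRange_one_eq_nil; norm_num
    rw [hr]
    simp only [List.foldl_nil]
    constructor
    · simp
    · rw [PySem.List.pyGetD_natCast, List.getD_eq_getElem?_getD,
        List.getElem?_set_eq_of_lt _ (by simp; omega)]
      have : trailingZeroes 5 = trailingZeroes ((5 : Nat) : Int) := by norm_num
      rw [this, tz_cast]
      have t0 : tzN 0 = 0 := by rw [tzN]; norm_num
      have t1 : tzN 1 = 0 := by rw [tzN]; norm_num [t0]
      have t2 : tzN 2 = 0 := by rw [tzN]; norm_num [t0]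
      have t3 : tzN 3 = 0 := by rw [tzN]; norm_num [t0]
      have t4 : tzN 4 = 0 := by rw [tzN]; norm_num [t0]
      have t5 : tzN 5 = 1 := by rw [tzN]; norm_num [t1]
      norm_num [SN, Finset.sum_range_succ, t0, t1, t2, t3, t4, t5]
  | succ m hm ih =>
    intro hle
    have hmn : (m : Int) ≤ n := by push_cast at hle ⊢; omega
    obtain ⟨ihlen, ihval⟩ := ih hmn
    have hcast : ((m + 1 : Nat) : Int) + 1 = ((m : Int) + 1) + 1 := by push_cast; ring
    have hsplit : PySem.List.pyRange 6 (((m + 1 : Nat) : Int) + 1) 1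
        = PySem.List.pyRange 6 ((m : Int) + 1) 1 ++ [(m : Int) + 1] := by
      rw [hcast]
      exact PySem.List.pyRange_one_succ_right (by omega)
    rw [hsplit, List.foldl_append]
    simp only [List.foldl_cons, List.foldl_nil]
    set DP := (PySem.List.pyRange 6 ((m : Int) + 1) 1).foldl
      (fun dp i => dp.set i.toNat (trailingZeroes i + PySem.List.pyGetD dp (i - 1) 0))
      ((List.replicate (n + 1).toNat (0 : Int)).set 5 (trailingZeroes 5)) with hDP
    have hidx : ((m : Int) + 1 - 1) = (m : Int) := by ring
    have htz : trailingZeroes ((m : Int) + 1) = ((tzN (m + 1) : Nat) : Int) := by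
      have : ((m : Int) + 1) = ((m + 1 : Nat) : Int) := by push_cast; ring
      rw [this, tz_cast]
    have hval : trailingZeroes ((m : Int) + 1) + PySem.List.pyGetD DP ((m : Int) + 1 - 1) 0
        = ((SN (m + 1) : Nat) : Int) := by
      rw [hidx, ihval, htz]
      have : SN (m + 1) = tzN (m + 1) + SN m := by
        unfold SN; rw [Finset.sum_range_succ]; ring
      rw [this]; push_cast; ring
    have hlt : ((m : Int) + 1).toNat < DP.length := by rw [ihlen]; omega
    constructor
    · simp [List.length_set, ihlen]
    · rw [hval]
      have hton : ((m : Int) + 1).toNat = m + 1 := by omega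
      rw [hton, PySem.List.pyGetD_natCast, List.getD_eq_getElem?_getD,
        List.getElem?_set_eq_of_lt _ (by rw [ihlen]; omega)]
      simp

theorem a_eq_SN (n : Int) (h : 6 ≤ n) : dp_zeroes n = (SN n.toNat : Int) := by
  obtain ⟨N, rfl⟩ : ∃ N : Nat, n = ↑N := ⟨n.toNat, by omega⟩
  rw [dp_zeroes]
  simp only [Int.toNat_natCast]
  rw [if_neg (by omega), if_neg (by omega)]
  exact (fold_inv (↑N) h N (by exact_mod_cast (by omega : (5 : Int) ≤ ↑N)) (by omega)).2

theorem SN5 : SN 5 = 1 := by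
  have t0 : tzN 0 = 0 := by rw [tzN]; norm_num
  have t1 : tzN 1 = 0 := by rw [tzN]; norm_num [t0]
  have t2 : tzN 2 = 0 := by rw [tzN]; norm_num [t0]
  have t3 : tzN 3 = 0 := by rw [tzN]; norm_num [t0]
  have t4 : tzN 4 = 0 := by rw [tzN]; norm_num [t0]
  have t5 : tzN 5 = 1 := by rw [tzN]; norm_num [t1]
  norm_num [SN, Finset.sum_range_succ, t0, t1, t2, t3, t4, t5]

theorem SN_le4 (N : Nat) (h : N ≤ 4) : SN N = 0 := by
  have t0 : tzN 0 = 0 := by rw [tzN]; norm_num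
  have t1 : tzN 1 = 0 := by rw [tzN]; norm_num [t0]
  have t2 : tzN 2 = 0 := by rw [tzN]; norm_num [t0]
  have t3 : tzN 3 = 0 := by rw [tzN]; norm_num [t0]
  have t4 : tzN 4 = 0 := by rw [tzN]; norm_num [t0]
  interval_cases N <;> norm_num [SN, Finset.sum_range_succ, t0, t1, t2, t3, t4]

-- ===== VERDICT (by name: the statement is the Claim_ definition above) =====
theorem dp_zeroes_spec : Claim_equal_dp_zeroes := by
  intro n _
  unfold Spec_dp_zeroes
  rcases lt_or_ge n 0 with hneg | hpos
  · rw [dp_zeroes, dp_zeroes_alt, altLoop]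
    rw [if_pos (by omega), if_neg (by omega)]
  · rcases lt_or_ge n 5 with h4 | h5
    · rw [dp_zeroes, alt_eq_SN n hpos, SN_le4 n.toNat (by omega)]
      rw [if_pos (by omega)]
      norm_num
    · rcases eq_or_lt_of_le h5 with h5e | h6
      · rw [dp_zeroes, alt_eq_SN n hpos, ← h5e]
        rw [if_neg (by omega), if_pos rfl]
        norm_num [SN5, (by omega : (5 : Int).toNat = 5)]
      · rw [a_eq_SN n (by omega), alt_eq_SN n hpos]
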